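-- pv_equiv track=rewrite | github.com/allenbenj/smart_document_organizer-main1 | agents/extractors/legal_entity_extractor.py | _parse_rebel_output
-- ===== SOURCE A (Python) =====
-- from typing import Any, Dict, List, Optional, Set, Tuple, cast  # noqa: E402
--
-- def _parse_rebel_output(text: str) -> List[Tuple[str, str, str]]:
--     """Parse the special tokenized output of REBEL into (subj, rel, obj) triplets."""
--     triplets = []
--     relation, subject, object_ = '', '', ''
--     text = text.strip()
--     current = 'x'
--     for token in text.replace("<s>", "").replace("</s>", "").split():
--         if token == "<triplet>":
--             current = 't'
--             if relation:
--                 triplets.append((subject.strip(), relation.strip(), object_.strip()))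
--                 relation, subject, object_ = '', '', ''
--             subject = ''
--         elif token == "<subj>":
--             current = 's'
--             if relation:
--                 triplets.append((subject.strip(), relation.strip(), object_.strip()))
--                 relation, subject, object_ = '', '', ''
--             object_ = ''
--         elif token == "<obj>":
--             current = 'o'
--             object_ = ''
--         else:
--             if current == 't': subject += ' ' + token
--             elif current == 's': object_ += ' ' + token
--             elif current == 'o': relation += ' ' + token
--     if relation:
--         triplets.append((subject.strip(), relation.strip(), object_.strip()))
--     return triplets
-- ===== SOURCE B (Python) =====
-- from typing import List, Tuple
--
-- _MARKERS = {"<triplet>": 't', "<subj>": 's', "<obj>": 'o'}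
--
-- def _parse_rebel_output(text: str) -> List[Tuple[str, str, str]]:
--     """Parse REBEL tokenized output: group tokens into (marker, chunk) events, then fold."""
--     # Pass 1: group the token stream into events; each marker opens a new chunk.
--     events = [('x', [])]
--     for token in text.strip().replace("<s>", "").replace("</s>", "").split():
--         if token in _MARKERS:
--             events.append((_MARKERS[token], []))
--         else:
--             events[-1][1].append(token)
--     # Pass 2: fold over events.
--     triplets = []
--     subject, relation, object_ = '', '', ''
--     for marker, chunk in events:
--         if marker == 't' or marker == 's':
--             if relation:
--                 triplets.append((subject.strip(), relation.strip(), object_.strip()))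
--                 subject, relation, object_ = '', '', ''
--             if marker == 't':
--                 subject = ''
--             else:
--                 object_ = ''
--         elif marker == 'o':
--             object_ = ''
--         words = ''.join(' ' + w for w in chunk)
--         if marker == 't':
--             subject += words
--         elif marker == 's':
--             object_ += words
--         elif marker == 'o':
--             relation += words
--     if relation:
--         triplets.append((subject.strip(), relation.strip(), object_.strip()))
--     return triplets
-- ===== Notes on version B (the rewrite author's own statement) =====
-- stated objective: alternative
-- what changed: B first groups the token stream into (marker, chunk) events in one grouping pass, then folds over the events, joining each chunk into its buffer in one step instead of A's per-token state-machine appends.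
import Mathlib
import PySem

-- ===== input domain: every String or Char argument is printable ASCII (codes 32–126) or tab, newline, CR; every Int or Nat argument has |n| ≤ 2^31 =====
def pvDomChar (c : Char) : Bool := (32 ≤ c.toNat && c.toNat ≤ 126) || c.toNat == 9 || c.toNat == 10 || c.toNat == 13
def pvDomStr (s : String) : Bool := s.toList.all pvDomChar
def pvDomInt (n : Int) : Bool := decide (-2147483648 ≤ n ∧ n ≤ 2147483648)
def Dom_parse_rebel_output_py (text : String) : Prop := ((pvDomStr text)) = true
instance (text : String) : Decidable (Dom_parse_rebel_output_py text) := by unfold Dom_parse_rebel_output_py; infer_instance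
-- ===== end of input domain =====

-- B groups the token stream into (marker, chunk) events and folds over the events (alternative decomposition, same cost).

-- ===== PORT A =====
structure PvStA where
  trip : List (String × String × String)
  subj : List Char
  rel : List Char
  obj : List Char
  cur : Char
deriving Repr, DecidableEq

def pvFlushTriple (subj rel obj : List Char) : String × String × String :=
  (String.ofList (PySem.Chars.strip subj), String.ofList (PySem.Chars.strip rel), String.ofList (PySem.Chars.strip obj))

def pvStepA (st : PvStA) (tok : List Char) : PvStA :=
  if tok = "<triplet>".toList then
    let st := { st with cur := 't' }
    let st := if st.rel ≠ [] then
        { st with trip := st.trip ++ [pvFlushTriple st.subj st.rel st.obj], rel := [], subj := [], obj := [] }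
      else st
    { st with subj := [] }
  else if tok = "<subj>".toList then
    let st := { st with cur := 's' }
    let st := if st.rel ≠ [] then
        { st with trip := st.trip ++ [pvFlushTriple st.subj st.rel st.obj], rel := [], subj := [], obj := [] }
      else st
    { st with obj := [] }
  else if tok = "<obj>".toList then
    { st with cur := 'o', obj := [] }
  else
    if st.cur = 't' then { st with subj := st.subj ++ ' ' :: tok }
    else if st.cur = 's' then { st with obj := st.obj ++ ' ' :: tok }
    else if st.cur = 'o' then { st with rel := st.rel ++ ' ' :: tok }
    else st

def pvTokens (text : String) : List (List Char) :=
  PySem.Chars.split₀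
    (PySem.Chars.replace (PySem.Chars.replace (PySem.Chars.strip text.toList) "<s>".toList [])
      "</s>".toList [])

def parse_rebel_output_py (text : String) : List (String × String × String) :=
  let st := (pvTokens text).foldl pvStepA ⟨[], [], [], [], 'x'⟩
  if st.rel ≠ [] then st.trip ++ [pvFlushTriple st.subj st.rel st.obj] else st.trip

-- ===== PORT B =====
def pvMarkers : PySem.Dict (List Char) Char :=
  PySem.Dict.ofList [("<triplet>".toList, 't'), ("<subj>".toList, 's'), ("<obj>".toList, 'o')]

def pvPushLast : List (Char × List (List Char)) → List Char → List (Char × List (List Char))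
  | [], _ => []
  | [(m, c)], w => [(m, c ++ [w])]
  | e :: rest, w => e :: pvPushLast rest w

def pvGrow (evs : List (Char × List (List Char))) (tok : List Char) : List (Char × List (List Char)) :=
  match pvMarkers.get? tok with
  | some m => evs ++ [(m, [])]
  | none => pvPushLast evs tok

structure PvStB where
  trip : List (String × String × String)
  subj : List Char
  rel : List Char
  obj : List Char
deriving Repr, DecidableEq

def pvJoinSp (chunk : List (List Char)) : List Char :=
  PySem.Chars.join [] (chunk.map (fun w => ' ' :: w))

def pvMarkB (sB : PvStB) (m : Char) : PvStB :=
  if m = 't' ∨ m = 's' then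
    let sB := if sB.rel ≠ [] then
        { sB with trip := sB.trip ++ [pvFlushTriple sB.subj sB.rel sB.obj], subj := [], rel := [], obj := [] }
      else sB
    if m = 't' then { sB with subj := [] } else { sB with obj := [] }
  else if m = 'o' then { sB with obj := [] }
  else sB

def pvAppendW (sB : PvStB) (m : Char) (ws : List Char) : PvStB :=
  if m = 't' then { sB with subj := sB.subj ++ ws }
  else if m = 's' then { sB with obj := sB.obj ++ ws }
  else if m = 'o' then { sB with rel := sB.rel ++ ws }
  else sB

def pvStepEv (sB : PvStB) (ev : Char × List (List Char)) : PvStB :=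
  pvAppendW (pvMarkB sB ev.1) ev.1 (pvJoinSp ev.2)

def parse_rebel_output_py_alt (text : String) : List (String × String × String) :=
  let events := (pvTokens text).foldl pvGrow [('x', [])]
  let st := events.foldl pvStepEv ⟨[], [], [], []⟩
  if st.rel ≠ [] then st.trip ++ [pvFlushTriple st.subj st.rel st.obj] else st.trip

-- ===== PRECONDITION & SPEC =====
def Spec_parse_rebel_output_py (text : String) (out : List (String × String × String)) : Prop := out = parse_rebel_output_py_alt text
instance (text : String) (out : List (String × String × String)) : Decidable (Spec_parse_rebel_output_py text out) := by unfold Spec_parse_rebel_output_py; infer_instance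

-- ===== CLAIM (what is proved, stated in full; the proofs are below) =====
def Claim_equal_parse_rebel_output_py : Prop := ∀ (text : String), Dom_parse_rebel_output_py text → Spec_parse_rebel_output_py text (parse_rebel_output_py text)

-- ===== LEMMAS AND PROOFS =====

def pvProj (st : PvStA) : PvStB := ⟨st.trip, st.subj, st.rel, st.obj⟩

def pvEvTail (m : Char) (c : List (List Char)) : List (List Char) → List (Char × List (List Char))
  | [] => [(m, c)]
  | t :: ts =>
    match pvMarkers.get? t with
    | some m' => (m, c) :: pvEvTail m' [] ts
    | none => pvEvTail m (c ++ [t]) ts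

theorem pv_pushLast_snoc (E : List (Char × List (List Char))) (m : Char) (c : List (List Char)) (w : List Char) :
    pvPushLast (E ++ [(m, c)]) w = E ++ [(m, c ++ [w])] := by
  induction E with
  | nil => rfl
  | cons e E ih =>
    cases E with
    | nil => rfl
    | cons e' E' => simpa [pvPushLast] using ih

theorem pv_grow_fold (ts : List (List Char)) :
    ∀ (E : List (Char × List (List Char))) (m : Char) (c : List (List Char)),
    List.foldl pvGrow (E ++ [(m, c)]) ts = E ++ pvEvTail m c ts := by
  induction ts with
  | nil => intro E m c; rfl
  | cons t ts ih =>
    intro E m c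
    simp only [List.foldl_cons, pvGrow, pvEvTail]
    cases h : pvMarkers.get? t with
    | some m' => simpa [List.append_assoc] using ih (E ++ [(m, c)]) m' []
    | none => rw [pv_pushLast_snoc]; exact ih E m (c ++ [t])

-- pvMarkers.get? characterization
theorem pv_get?_eq (t : List Char) :
    pvMarkers.get? t =
      if "<triplet>".toList = t then some 't'
      else if "<subj>".toList = t then some 's'
      else if "<obj>".toList = t then some 'o'
      else none := by
  have h : pvMarkers = PySem.Dict.mk
      [("<triplet>".toList, 't'), ("<subj>".toList, 's'), ("<obj>".toList, 'o')] := by decide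
  rw [h]
  simp only [PySem.Dict.get?_mk_cons, beq_iff_eq]
  split_ifs <;> rfl

-- A's step on a non-marker token
theorem pv_stepA_word (st : PvStA) (w : List Char) (h : pvMarkers.get? w = none) :
    pvStepA st w =
      { st with subj := if st.cur = 't' then st.subj ++ ' ' :: w else st.subj,
                obj := if st.cur = 's' then st.obj ++ ' ' :: w else st.obj,
                rel := if st.cur = 'o' then st.rel ++ ' ' :: w else st.rel } := by
  rw [pv_get?_eq] at h
  split_ifs at h with h1 h2 h3
  have h1' : w ≠ "<triplet>".toList := fun hw => h1 hw.symm
  have h2' : w ≠ "<subj>".toList := fun hw => h2 hw.symm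
  have h3' : w ≠ "<obj>".toList := fun hw => h3 hw.symm
  simp only [pvStepA, if_neg h1', if_neg h2', if_neg h3']
  split_ifs with c1 c2 c3 <;> simp_all

-- projection of A's step on a marker token
theorem pv_stepA_marker (st : PvStA) (t : List Char) (m : Char) (h : pvMarkers.get? t = some m) :
    pvProj (pvStepA st t) = pvMarkB (pvProj st) m ∧ (pvStepA st t).cur = m := by
  rw [pv_get?_eq] at h
  split_ifs at h with h1 h2 h3 <;>
    (cases h; first
      | (subst h1; constructor <;> (simp only [pvStepA, pvMarkB, pvProj]; split_ifs <;> simp_all))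
      | (subst h2; constructor <;> (simp only [pvStepA, pvMarkB, pvProj]; split_ifs <;> simp_all))
      | (subst h3; constructor <;> (simp only [pvStepA, pvMarkB, pvProj]; split_ifs <;> simp_all)))

theorem pv_markB_idem (sB : PvStB) (m : Char) :
    pvMarkB (pvMarkB sB m) m = pvMarkB sB m := by
  simp only [pvMarkB]
  split_ifs <;> simp_all

theorem pv_appendW_appendW (sB : PvStB) (m : Char) (a b : List Char) :
    pvAppendW (pvAppendW sB m a) m b = pvAppendW sB m (a ++ b) := by
  simp only [pvAppendW]
  split_ifs <;> simp_all

theorem pv_appendW_nil (sB : PvStB) (m : Char) : pvAppendW sB m [] = sB := by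
  simp only [pvAppendW]
  split_ifs <;> simp

theorem pv_joinSp_nil : pvJoinSp [] = [] := rfl

theorem pv_joinSp_cons (w : List Char) (c : List (List Char)) :
    pvJoinSp (w :: c) = (' ' :: w) ++ pvJoinSp c := by
  cases c with
  | nil => simp [pvJoinSp, PySem.Chars.join_singleton, PySem.Chars.join_nil]
  | cons v c => simp [pvJoinSp, PySem.Chars.join_cons_cons]

-- processing a pure chunk of non-marker tokens
theorem pv_chunk (c : List (List Char)) :
    ∀ (st : PvStA), (∀ w ∈ c, pvMarkers.get? w = none) →
    pvProj (List.foldl pvStepA st c) = pvAppendW (pvProj st) st.cur (pvJoinSp c) ∧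
    (List.foldl pvStepA st c).cur = st.cur := by
  induction c with
  | nil => intro st _; simp [pv_joinSp_nil, pv_appendW_nil]
  | cons w c ih =>
    intro st hc
    have hw : pvMarkers.get? w = none := hc w (by simp)
    have hstep := pv_stepA_word st w hw
    have hc' : ∀ v ∈ c, pvMarkers.get? v = none := fun v hv => hc v (by simp [hv])
    obtain ⟨ihp, ihc⟩ := ih (pvStepA st w) hc'
    have hcur : (pvStepA st w).cur = st.cur := by rw [hstep]
    have hproj : pvProj (pvStepA st w) = pvAppendW (pvProj st) st.cur (' ' :: w) := by
      rw [hstep]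
      simp only [pvProj, pvAppendW]
      split_ifs <;> simp_all
    constructor
    · rw [List.foldl_cons, ihp, hcur, hproj, pv_appendW_appendW, pv_joinSp_cons]
    · rw [List.foldl_cons, ihc, hcur]

-- folding events only depends on the start state through the head marker's action
theorem pv_head (ts : List (List Char)) :
    ∀ (m : Char) (c : List (List Char)) (sB sB' : PvStB), pvMarkB sB m = pvMarkB sB' m →
    List.foldl pvStepEv sB (pvEvTail m c ts) = List.foldl pvStepEv sB' (pvEvTail m c ts) := by
  induction ts with
  | nil => intro m c sB sB' h; simp [pvEvTail, pvStepEv, h]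
  | cons t ts ih =>
    intro m c sB sB' h
    cases hm : pvMarkers.get? t with
    | some m' =>
      simp only [pvEvTail, hm, List.foldl_cons]
      have : pvStepEv sB (m, c) = pvStepEv sB' (m, c) := by simp [pvStepEv, h]
      rw [this]
    | none =>
      simp only [pvEvTail, hm]
      exact ih m (c ++ [t]) sB sB' h

-- the main simulation lemma
theorem pv_main (ts : List (List Char)) :
    ∀ (m : Char) (c : List (List Char)) (st : PvStA),
    st.cur = m → pvMarkB (pvProj st) m = pvProj st → (∀ w ∈ c, pvMarkers.get? w = none) →
    List.foldl pvStepEv (pvProj st) (pvEvTail m c ts) = pvProj (List.foldl pvStepA st (c ++ ts)) := by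
  induction ts with
  | nil =>
    intro m c st h1 h2 h3
    obtain ⟨hp, _⟩ := pv_chunk c st h3
    simp only [pvEvTail, List.foldl_cons, List.foldl_nil, List.append_nil, pvStepEv]
    rw [h2, hp, h1]
  | cons t ts ih =>
    intro m c st h1 h2 h3
    cases hm : pvMarkers.get? t with
    | none =>
      simp only [pvEvTail, hm]
      have h3' : ∀ w ∈ c ++ [t], pvMarkers.get? w = none := by
        intro w hw
        rcases List.mem_append.mp hw with h | h
        · exact h3 w h
        · simp at h; subst h; exact hm
      have := ih m (c ++ [t]) st h1 h2 h3'
      rw [this, List.append_assoc]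
      rfl
    | some m' =>
      simp only [pvEvTail, hm, List.foldl_cons]
      obtain ⟨hp, hcur⟩ := pv_chunk c st h3
      set st1 := List.foldl pvStepA st c with hst1
      have hstep1 : pvStepEv (pvProj st) (m, c) = pvProj st1 := by
        simp only [pvStepEv, h2, hp, h1]
      obtain ⟨hp2, hcur2⟩ := pv_stepA_marker st1 t m' hm
      set st2 := pvStepA st1 t with hst2
      have h2' : pvMarkB (pvProj st2) m' = pvProj st2 := by
        rw [hp2, pv_markB_idem]
      have hhead : List.foldl pvStepEv (pvProj st1) (pvEvTail m' [] ts) =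
          List.foldl pvStepEv (pvProj st2) (pvEvTail m' [] ts) := by
        apply pv_head
        rw [hp2]
        exact (pv_markB_idem _ _).symm
      have hih := ih m' [] st2 hcur2 h2' (by simp)
      simp only [List.nil_append] at hih
      rw [hstep1, hhead, hih]
      have : List.foldl pvStepA st (c ++ t :: ts) = List.foldl pvStepA st2 ts := by
        rw [show c ++ t :: ts = (c ++ [t]) ++ ts by simp, List.foldl_append, List.foldl_append]
        rfl
      rw [this]

-- ===== VERDICT (by name: the statement is the Claim_ definition above) =====
theorem parse_rebel_output_py_spec : Claim_equal_parse_rebel_output_py := by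
  intro text _
  unfold Spec_parse_rebel_output_py parse_rebel_output_py parse_rebel_output_py_alt
  have hev : (pvTokens text).foldl pvGrow [('x', [])] = pvEvTail 'x' [] (pvTokens text) := by
    simpa using pv_grow_fold (pvTokens text) [] 'x' []
  have h := pv_main (pvTokens text) 'x' [] ⟨[], [], [], [], 'x'⟩ rfl (by decide) (by simp)
  simp only [List.nil_append] at h
  have h' : pvProj ⟨[], [], [], [], 'x'⟩ = (⟨[], [], [], []⟩ : PvStB) := rfl
  rw [h'] at h
  simp only [hev, h, pvProj]
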